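-- pv_equiv track=rewrite | github.com/agruber/insect-pol-iii | scripts/bioseq_lib.py | extract_kmers
-- ===== SOURCE A (Python) =====
-- from typing import Dict, List, Tuple, Optional, TextIO, Union, Iterator
--
-- def extract_kmers(sequence: str, k: int, start_pos: int = 0, end_pos: Optional[int] = None) -> Dict[str, List[int]]:
--     """
--     Extract k-mers from a sequence region and their positions.
--
--     Args:
--         sequence: Input sequence
--         k: K-mer length
--         start_pos: Start position (0-based)
--         end_pos: End position (0-based, None for end of sequence)
--
--     Returns:
--         Dictionary mapping k-mer to list of positions
--     """
--     if end_pos is None: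
--         end_pos = len(sequence)
--
--     sequence = sequence.upper()
--     kmers = {}
--
--     for i in range(start_pos, end_pos - k + 1):
--         kmer = sequence[i:i+k]
--         if 'N' not in kmer:  # Skip k-mers with ambiguous nucleotides
--             if kmer not in kmers:
--                 kmers[kmer] = []
--             kmers[kmer].append(i)
--
--     return kmers
-- ===== SOURCE B (Python) =====
-- def extract_kmers(sequence, k, start_pos=0, end_pos=None):
--     """Extract k-mers and their positions: collect the clean (kmer, position)
--     pairs once, then build the result by grouping positions per distinct kmer
--     (first-appearance order), instead of growing a dict inside the scan."""
--     if end_pos is None: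
--         end_pos = len(sequence)
--     seq = sequence.upper()
--     pairs = [(seq[i:i + k], i) for i in range(start_pos, end_pos - k + 1)]
--     pairs = [(m, i) for (m, i) in pairs if 'N' not in m]
--     order = dict.fromkeys(m for (m, _) in pairs)
--     return {m: [i for (mm, i) in pairs if mm == m] for m in order}
-- ===== Notes on version B (the rewrite author's own statement) =====
-- stated objective: alternative
-- what changed: B collects the clean (kmer, position) pairs in one list pass and then builds the result by grouping positions per distinct kmer in first-appearance order, instead of A's incremental dict growing inside the scan.
import Mathlib
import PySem

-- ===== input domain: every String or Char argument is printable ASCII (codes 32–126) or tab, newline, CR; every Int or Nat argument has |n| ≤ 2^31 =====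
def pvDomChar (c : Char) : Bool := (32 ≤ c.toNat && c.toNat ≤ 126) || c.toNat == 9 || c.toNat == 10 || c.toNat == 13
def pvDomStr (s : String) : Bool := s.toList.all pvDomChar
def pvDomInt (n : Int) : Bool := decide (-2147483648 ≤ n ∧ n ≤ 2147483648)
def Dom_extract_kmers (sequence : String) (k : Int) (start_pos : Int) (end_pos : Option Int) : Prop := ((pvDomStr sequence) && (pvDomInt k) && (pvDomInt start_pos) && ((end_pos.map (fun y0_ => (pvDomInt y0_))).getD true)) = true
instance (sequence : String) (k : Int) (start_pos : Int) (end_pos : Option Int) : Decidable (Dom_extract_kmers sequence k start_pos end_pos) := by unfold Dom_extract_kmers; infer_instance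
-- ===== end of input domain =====

-- B groups the collected clean (kmer, position) pairs per distinct kmer instead of growing a dict
-- during the scan; same return value everywhere (objective: alternative decomposition).

-- ===== PORT A =====
def extract_kmers (sequence : String) (k : Int) (start_pos : Int) (end_pos : Option Int) : List (String × List Int) :=
  let ep : Int := end_pos.getD (PySem.Str.len sequence)
  let seq : List Char := PySem.Chars.upper sequence.toList
  let kmers : PySem.Dict (List Char) (List Int) :=
    (PySem.List.pyRange start_pos (ep - k + 1) 1).foldl
      (fun d i =>
        let kmer := PySem.List.slice seq (some i) (some (i + k))
        if PySem.Chars.isIn ['N'] kmer then d        -- 'N' in kmer → skip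
        else
          let d' := if d.contains kmer then d else d.insert kmer []   -- if kmer not in kmers: kmers[kmer] = []
          d'.modify kmer [] (fun l => l ++ [i]))                      -- kmers[kmer].append(i)
      PySem.Dict.empty
  kmers.items.map (fun p => (String.ofList p.1, p.2))

-- ===== PORT B =====
def extract_kmers_alt (sequence : String) (k : Int) (start_pos : Int) (end_pos : Option Int) : List (String × List Int) :=
  let ep : Int := end_pos.getD (PySem.Str.len sequence)
  let seq : List Char := PySem.Chars.upper sequence.toList
  let pairs0 : List (List Char × Int) :=
    (PySem.List.pyRange start_pos (ep - k + 1) 1).map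
      (fun i => (PySem.List.slice seq (some i) (some (i + k)), i))
  let pairs := pairs0.filter (fun p => !(PySem.Chars.isIn ['N'] p.1))
  let order := PySem.List.dedup (pairs.map (·.1))
  order.map (fun m => (String.ofList m, (pairs.filter (fun p => p.1 == m)).map (·.2)))

-- ===== PRECONDITION & SPEC =====
def Spec_extract_kmers (sequence : String) (k : Int) (start_pos : Int) (end_pos : Option Int) (out : List (String × List Int)) : Prop := out = extract_kmers_alt sequence k start_pos end_pos
instance (sequence : String) (k : Int) (start_pos : Int) (end_pos : Option Int) (out : List (String × List Int)) : Decidable (Spec_extract_kmers sequence k start_pos end_pos out) := by unfold Spec_extract_kmers; infer_instance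

-- ===== CLAIM (what is proved, stated in full; the proofs are below) =====
def Claim_equal_extract_kmers : Prop := ∀ (sequence : String) (k : Int) (start_pos : Int) (end_pos : Option Int), Dom_extract_kmers sequence k start_pos end_pos → Spec_extract_kmers sequence k start_pos end_pos (extract_kmers sequence k start_pos end_pos)

-- ===== LEMMAS AND PROOFS =====

-- a fold whose body skips the elements satisfying c is a fold over the filtered list
theorem foldl_skip_if {α β : Type} (c : β → Bool) (g : α → β → α) :
    ∀ (l : List β) (init : α),
      l.foldl (fun a x => if c x then a else g a x) init
        = (l.filter (fun x => !(c x))).foldl g init := by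
  intro l
  induction l with
  | nil => intro init; rfl
  | cons x xs ih =>
    intro init
    by_cases h : c x = true
    · simp [h, ih]
    · simp at h
      simp [h, ih]

-- 'ensure key present with [], then append' is exactly modify-with-default-[]
theorem insert_modify_collapse (d : PySem.Dict (List Char) (List Int)) (m : List Char) (i : Int) :
    (if d.contains m then d else d.insert m []).modify m [] (fun l => l ++ [i])
      = d.modify m [] (fun l => l ++ [i]) := by
  by_cases h : d.contains m = true
  · simp [h]
  · simp only [Bool.not_eq_true] at h
    simp [h, PySem.Dict.modify, PySem.Dict.insert_insert_self,
      PySem.Dict.getD_insert_self, PySem.Dict.getD_of_not_contains]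

-- the grouped dict built by the modify-append loop, described item by item
theorem items_group_loop (q : List (List Char × Int)) :
    (q.foldl (fun d p => d.modify p.1 [] (fun l => l ++ [p.2]))
        (PySem.Dict.empty : PySem.Dict (List Char) (List Int))).items
      = (PySem.List.dedup (q.map (·.1))).map
          (fun m => (m, (q.filter (fun p => p.1 == m)).map (·.2))) := by
  have hnd : (q.foldl (fun d p => d.modify p.1 [] (fun l => l ++ [p.2]))
      (PySem.Dict.empty : PySem.Dict (List Char) (List Int))).keys.Nodup := by
    exact PySem.Dict.nodup_keys_foldl_modify_key q (fun p => p.1) []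
      (fun d p l => l ++ [p.2]) PySem.Dict.empty (by simp)
  have hkeys : (q.foldl (fun d p => d.modify p.1 [] (fun l => l ++ [p.2]))
      (PySem.Dict.empty : PySem.Dict (List Char) (List Int))).keys
      = PySem.List.dedup (q.map (·.1)) := by
    rw [PySem.Dict.keys_foldl_modify_key]
    simp [PySem.Set.update_nil_left]
  rw [PySem.Dict.items_eq_map_keys _ hnd ([] : List Int), hkeys]
  refine List.map_congr_left (fun m hm => ?_)
  congr 1
  rw [PySem.Dict.getD_foldl_modify_append]
  simp

-- ===== VERDICT (by name: the statement is the Claim_ definition above) =====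
theorem extract_kmers_spec : Claim_equal_extract_kmers := by
  intro sequence k start_pos end_pos _
  unfold Spec_extract_kmers extract_kmers extract_kmers_alt
  simp only []
  set ep := end_pos.getD (PySem.Str.len sequence) with hep
  set seq := PySem.Chars.upper sequence.toList with hseq
  set l := PySem.List.pyRange start_pos (ep - k + 1) 1 with hl
  set f : Int → List Char := fun i => PySem.List.slice seq (some i) (some (i + k)) with hf
  -- rewrite A's fold over the index range as a fold over the pair list
  have h1 : (l.foldl
      (fun d i =>
        if PySem.Chars.isIn ['N'] (f i) then d
        else (if d.contains (f i) then d else d.insert (f i) []).modify (f i) []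
          (fun lst => lst ++ [i]))
      (PySem.Dict.empty : PySem.Dict (List Char) (List Int)))
      = ((l.map (fun i => (f i, i))).foldl
        (fun d p =>
          if PySem.Chars.isIn ['N'] p.1 then d
          else (if d.contains p.1 then d else d.insert p.1 []).modify p.1 []
            (fun lst => lst ++ [p.2]))
        PySem.Dict.empty) := by
    rw [List.foldl_map]
  rw [h1]
  have hs := foldl_skip_if (fun p : List Char × Int => PySem.Chars.isIn ['N'] p.1)
    (fun d p => (if d.contains p.1 then d else d.insert p.1 []).modify p.1 []
      (fun lst => lst ++ [p.2]))
    (l.map (fun i => (f i, i))) PySem.Dict.empty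
  rw [hs]
  have h2 : ∀ (q : List (List Char × Int)) (d : PySem.Dict (List Char) (List Int)),
      q.foldl (fun d p => (if d.contains p.1 then d else d.insert p.1 []).modify p.1 []
        (fun lst => lst ++ [p.2])) d
      = q.foldl (fun d p => d.modify p.1 [] (fun lst => lst ++ [p.2])) d := by
    intro q
    induction q with
    | nil => intro d; rfl
    | cons p ps ih => intro d; simp only [List.foldl_cons, insert_modify_collapse]
  rw [h2, items_group_loop, List.map_map]
  simp [hf]
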